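-- pv_equiv track=rewrite | github.com/fusoyeahhh/progressive_randomizer | progressive_randomizer/future/__init__.py | handle_var_mask
-- ===== SOURCE A (Python) =====
-- def handle_var_mask(descr):
--     descr = list(descr)[::-1]
--     masks, last = {}, None
--     for i, c in enumerate(descr):
--         mask = masks.get(c, 0)
--         masks[c] = mask | (1 << i)
--
--     masks.pop('-', None)
--     return masks
-- ===== SOURCE B (Python) =====
-- def handle_var_mask(descr):
--     items = list(descr)
--     n = len(items)
--     out = {}
--     for i in range(n - 1, -1, -1):
--         c = items[i]
--         if c == '-' or c in out:
--             continue
--         m = 0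
--         for j, c2 in enumerate(items):
--             if c2 == c:
--                 m |= 1 << (n - 1 - j)
--         out[c] = m
--     return out
-- ===== Notes on version B (the rewrite author's own statement) =====
-- stated objective: alternative
-- what changed: Replaced A's single accumulating pass over the reversed string (incrementally OR-ing one bit per position into a dict entry, then popping the placeholder key at the end) with a no-reversal nested scan: iterate positions from the end, and for each previously unseen non-placeholder character compute its complete mask in one dedicated enumerate pass using bit n-1-j.
import Mathlib
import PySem

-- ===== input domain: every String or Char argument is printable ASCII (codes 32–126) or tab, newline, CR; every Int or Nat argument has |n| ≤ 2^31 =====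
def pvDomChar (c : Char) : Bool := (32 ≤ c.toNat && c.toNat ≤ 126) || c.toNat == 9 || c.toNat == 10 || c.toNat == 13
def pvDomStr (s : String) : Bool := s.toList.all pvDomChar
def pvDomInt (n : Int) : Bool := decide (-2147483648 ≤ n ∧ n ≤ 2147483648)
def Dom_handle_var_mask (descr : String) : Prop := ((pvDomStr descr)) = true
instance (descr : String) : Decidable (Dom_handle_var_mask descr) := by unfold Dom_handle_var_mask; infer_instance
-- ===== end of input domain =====

-- B replaces A's single accumulating pass over the reversed string with a no-reversal
-- per-character nested scan (alternative decomposition, not claimed faster).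

-- single-character Python string (dict keys of both programs are the characters as str)
def pvMk1 (c : Char) : String := String.ofList [c]

-- Python's 1 << i (i ≥ 0 at every use below, so .toNat is exact)
def pvBit (i : Int) : Int := (1 : Int) <<< i.toNat

-- ===== PORT A =====
def handle_var_mask (descr : String) : List (String × Int) :=
  -- descr = list(descr)[::-1]
  let rev : List Char := (PySem.List.slice? descr.toList none none (-1)).getD []
  -- for i, c in enumerate(descr): masks[c] = masks.get(c, 0) | (1 << i)
  let masks : PySem.Dict String Int :=
    (PySem.List.enumerate rev).foldl
      (fun d p =>
        d.insert (pvMk1 p.2)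
          (PySem.Int.bor (d.getD (pvMk1 p.2) 0) (pvBit p.1)))
      PySem.Dict.empty
  -- masks.pop('-', None)  (returned value discarded; only the removal is observable)
  (masks.erase "-").items

-- ===== PORT B =====
-- inner loop of B: m = 0; for j, c2 in enumerate(items): if c2 == c: m |= 1 << (n-1-j)
def pvMaskOf (items : List Char) (n : Int) (c : Char) : Int :=
  (PySem.List.enumerate items).foldl
    (fun m p => if p.2 = c then PySem.Int.bor m (pvBit (n - 1 - p.1)) else m) 0

-- body of B's outer loop, for the character c = items[i]
def pvBstep (items : List Char) (n : Int) (d : PySem.Dict String Int) (c : Char) :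
    PySem.Dict String Int :=
  if c = '-' ∨ d.contains (pvMk1 c) = true then d
  else d.insert (pvMk1 c) (pvMaskOf items n c)

def handle_var_mask_alt (descr : String) : List (String × Int) :=
  let items : List Char := descr.toList
  let n : Int := items.length
  let out : PySem.Dict String Int :=
    (PySem.List.pyRange (n - 1) (-1) (-1)).foldl
      (fun d i => pvBstep items n d (PySem.List.pyGetD items i ' ')) PySem.Dict.empty
  out.items

-- ===== PRECONDITION & SPEC =====
def Spec_handle_var_mask (descr : String) (out : List (String × Int)) : Prop := out = handle_var_mask_alt descr
instance (descr : String) (out : List (String × Int)) : Decidable (Spec_handle_var_mask descr out) := by unfold Spec_handle_var_mask; infer_instance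

-- ===== CLAIM (what is proved, stated in full; the proofs are below) =====
def Claim_equal_handle_var_mask : Prop := ∀ (descr : String), Dom_handle_var_mask descr → Spec_handle_var_mask descr (handle_var_mask descr)

-- ===== LEMMAS AND PROOFS =====

-- mask of cc over a char list, ascending bit indices starting at k
def pvBitsUp (cc : Char) : List Char → Nat → Nat
  | [], _ => 0
  | x :: xs, k => (if x = cc then 2 ^ k else 0) ||| pvBitsUp cc xs (k + 1)

-- mask of cc over a char list, descending bit indices starting at k
def pvBitsDown (cc : Char) : List Char → Nat → Nat
  | [], _ => 0
  | x :: xs, k => (if x = cc then 2 ^ k else 0) ||| pvBitsDown cc xs (k - 1)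

-- first occurrences of l not yet in seen, in order
def pvFirsts : List Char → List Char → List Char
  | [], _ => []
  | x :: xs, seen => if x ∈ seen then pvFirsts xs seen else x :: pvFirsts xs (seen ++ [x])

-- key order produced by B's outer loop: first occurrences, skipping '-' and seen keys
def pvBkeys : List Char → List String → List Char
  | [], _ => []
  | x :: xs, seen =>
      if x = '-' ∨ pvMk1 x ∈ seen then pvBkeys xs seen
      else x :: pvBkeys xs (seen ++ [pvMk1 x])

theorem pvMk1_inj {a b : Char} (h : pvMk1 a = pvMk1 b) : a = b := by
  have := congrArg String.toList h
  simpa [pvMk1] using this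

theorem pvMk1_beq_dash (c : Char) : (pvMk1 c == "-") = (c == '-') := by
  by_cases h : c = '-'
  · subst h; rfl
  · have hne : pvMk1 c ≠ "-" := by
      intro hc
      have := congrArg String.toList hc
      simp [pvMk1] at this
      exact h this
    simp [hne, h]

theorem pvBit_natCast (k : Nat) : pvBit (k : Int) = ((2 ^ k : Nat) : Int) := by
  simp [pvBit, Int.shiftLeft_eq]

-- value computed by A's loop for one key
theorem pvA1 (cc : Char) (l : List Char) (k0 : Nat) (d : PySem.Dict String Int) (v : Nat)
    (hv : d.getD (pvMk1 cc) 0 = (v : Int)) :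
    ((PySem.List.enumerate l (k0 : Int)).foldl
      (fun d p =>
        d.insert (pvMk1 p.2)
          (PySem.Int.bor (d.getD (pvMk1 p.2) 0) (pvBit p.1))) d).getD (pvMk1 cc) 0
      = ((v ||| pvBitsUp cc l k0 : Nat) : Int) := by
  induction l generalizing k0 d v with
  | nil => simpa [PySem.List.enumerate_nil, pvBitsUp] using hv
  | cons x xs ih =>
    rw [PySem.List.enumerate_cons]
    simp only [List.foldl_cons]
    have hcast : ((k0 : Int) + 1) = ((k0 + 1 : Nat) : Int) := by push_cast; ring
    by_cases hx : x = cc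
    · subst hx
      have hstep : ((d.insert (pvMk1 x)
          (PySem.Int.bor (d.getD (pvMk1 x) 0) (pvBit (k0 : Int)))).getD (pvMk1 x) 0)
          = ((v ||| 2 ^ k0 : Nat) : Int) := by
        rw [PySem.Dict.getD_insert_self, hv, pvBit_natCast, PySem.Int.bor_natCast]
      rw [hcast, ih (k0 + 1) _ (v ||| 2 ^ k0) hstep]
      simp [pvBitsUp, Nat.or_assoc]
    · have hne : pvMk1 cc ≠ pvMk1 x := fun h => hx (pvMk1_inj h).symm
      have hstep : ((d.insert (pvMk1 x)
          (PySem.Int.bor (d.getD (pvMk1 x) 0) (pvBit (k0 : Int)))).getD (pvMk1 cc) 0)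
          = (v : Int) := by
        rw [PySem.Dict.getD_insert_of_ne _ _ _ hne, hv]
      rw [hcast, ih (k0 + 1) _ v hstep]
      simp [pvBitsUp, hx]

theorem pvBitsUp_append (cc : Char) (a b : List Char) (k : Nat) :
    pvBitsUp cc (a ++ b) k = pvBitsUp cc a k ||| pvBitsUp cc b (k + a.length) := by
  induction a generalizing k with
  | nil => simp [pvBitsUp]
  | cons x xs ih =>
    simp only [List.cons_append, pvBitsUp, ih (k + 1), List.length_cons, Nat.or_assoc]
    congr 3
    omega

theorem pvBitsUp_reverse (cc : Char) (l : List Char) (k : Nat) :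
    pvBitsUp cc l.reverse k = pvBitsDown cc l (k + l.length - 1) := by
  induction l generalizing k with
  | nil => simp [pvBitsUp, pvBitsDown]
  | cons x xs ih =>
    rw [List.reverse_cons, pvBitsUp_append, ih k]
    simp only [pvBitsUp, pvBitsDown, List.length_reverse, List.length_cons]
    have h1 : k + (xs.length + 1) - 1 = k + xs.length := by omega
    rw [h1, Nat.or_zero, Nat.or_comm]

-- value computed by B's inner loop for one key
theorem pvM1 (cc : Char) (N : Nat) (l : List Char) (j : Nat) (v : Nat)
    (h : j + l.length = N) :
    ((PySem.List.enumerate l (j : Int)).foldl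
      (fun m p => if p.2 = cc then PySem.Int.bor m (pvBit ((N : Int) - 1 - p.1)) else m)
      ((v : Nat) : Int))
      = ((v ||| pvBitsDown cc l (N - 1 - j) : Nat) : Int) := by
  induction l generalizing j v with
  | nil => simp [PySem.List.enumerate_nil, pvBitsDown]
  | cons x xs ih =>
    rw [PySem.List.enumerate_cons]
    simp only [List.foldl_cons]
    have hlen0 : j + (xs.length + 1) = N := by simpa using h
    have hjN : j < N := by omega
    have hexp : (((N : Int) - 1 - (j : Int)).toNat) = N - 1 - j := by omega
    have hcast : ((j : Int) + 1) = ((j + 1 : Nat) : Int) := by push_cast; ring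
    have hlen : (j + 1) + xs.length = N := by omega
    have hsub : N - 1 - (j + 1) = (N - 1 - j) - 1 := by omega
    by_cases hx : x = cc
    · subst hx
      have hbit : pvBit ((N : Int) - 1 - (j : Int)) = ((2 ^ (N - 1 - j) : Nat) : Int) := by
        rw [pvBit, hexp]
        simp [Int.shiftLeft_eq]
      rw [if_pos rfl, hbit, PySem.Int.bor_natCast, hcast,
        ih (j + 1) (v ||| 2 ^ (N - 1 - j)) hlen]
      simp [pvBitsDown, hsub, Nat.or_assoc]
    · rw [if_neg hx, hcast, ih (j + 1) v hlen]
      simp only [pvBitsDown, if_neg hx, hsub, Nat.zero_or]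

theorem pvMaskOf_eq (items : List Char) (c : Char) :
    pvMaskOf items (items.length : Int) c = ((pvBitsUp c items.reverse 0 : Nat) : Int) := by
  have h := pvM1 c items.length items 0 0 (by omega)
  simp only [Nat.cast_zero, Nat.zero_or, Nat.sub_zero] at h
  rw [pvMaskOf, h, pvBitsUp_reverse]
  congr 2
  omega

-- ordered-dedup characterisation of PySem.Set building
theorem pvSet_add_mem {α : Type} [BEq α] [LawfulBEq α] {s : List α} {x : α} (hx : x ∈ s) :
    PySem.Set.add s x = s := by
  simp [PySem.Set.add, PySem.Set.contains, hx]

theorem pvSet_add_not_mem {α : Type} [BEq α] [LawfulBEq α] {s : List α} {x : α} (hx : x ∉ s) :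
    PySem.Set.add s x = s ++ [x] := by
  simp [PySem.Set.add, PySem.Set.contains, hx]

theorem pvFoldl_add (l : List Char) (s : List Char) :
    l.foldl PySem.Set.add s = s ++ pvFirsts l s := by
  induction l generalizing s with
  | nil => simp [pvFirsts]
  | cons x xs ih =>
    simp only [List.foldl_cons, pvFirsts]
    by_cases hx : x ∈ s
    · rw [if_pos hx, pvSet_add_mem hx, ih]
    · rw [if_neg hx, pvSet_add_not_mem hx, ih (s ++ [x]), List.append_assoc]
      rfl

theorem pvFoldl_add_map (l : List Char) (s : List Char) :
    (l.map pvMk1).foldl PySem.Set.add (s.map pvMk1) = (l.foldl PySem.Set.add s).map pvMk1 := by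
  induction l generalizing s with
  | nil => simp
  | cons x xs ih =>
    simp only [List.map_cons, List.foldl_cons]
    have hmem : pvMk1 x ∈ s.map pvMk1 ↔ x ∈ s := by
      constructor
      · intro h
        obtain ⟨y, hy, hxy⟩ := List.mem_map.mp h
        rwa [← pvMk1_inj hxy.symm] at hy
      · intro h
        exact List.mem_map.mpr ⟨x, h, rfl⟩
    by_cases hx : x ∈ s
    · rw [pvSet_add_mem (hmem.mpr hx), pvSet_add_mem hx, ih]
    · rw [pvSet_add_not_mem (fun h => hx (hmem.mp h)), pvSet_add_not_mem hx,
        show s.map pvMk1 ++ [pvMk1 x] = (s ++ [x]).map pvMk1 by simp, ih]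

theorem pvDedup_eq_firsts (l : List Char) : PySem.List.dedup l = pvFirsts l [] := by
  rw [PySem.List.dedup, PySem.Set.ofList_eq_foldl, pvFoldl_add]
  rfl

theorem pvBkeys_eq_firsts (l : List Char) (seenC : List Char) :
    pvBkeys l ((seenC.filter (fun c => !(c == '-'))).map pvMk1)
      = (pvFirsts l seenC).filter (fun c => !(c == '-')) := by
  induction l generalizing seenC with
  | nil => simp [pvBkeys, pvFirsts]
  | cons x xs ih =>
    simp only [pvBkeys, pvFirsts]
    by_cases hx : x = '-'
    · subst hx
      rw [if_pos (Or.inl rfl)]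
      by_cases hm : '-' ∈ seenC
      · rw [if_pos hm, ih seenC]
      · rw [if_neg hm, List.filter_cons]
        simp only [beq_self_eq_true, Bool.not_true, Bool.false_eq_true, if_false]
        have hseen : (seenC ++ ['-']).filter (fun c => !(c == '-')) = seenC.filter (fun c => !(c == '-')) := by
          simp [List.filter_append]
        rw [← hseen, ih (seenC ++ ['-'])]
    · have hmem : (pvMk1 x ∈ (seenC.filter (fun c => !(c == '-'))).map pvMk1) ↔ x ∈ seenC := by
        constructor
        · intro h
          obtain ⟨y, hy, hxy⟩ := List.mem_map.mp h
          rw [← pvMk1_inj hxy.symm] at hy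
          exact (List.mem_filter.mp hy).1
        · intro h
          exact List.mem_map.mpr ⟨x, List.mem_filter.mpr ⟨h, by simp [hx]⟩, rfl⟩
      by_cases hm : x ∈ seenC
      · rw [if_pos (Or.inr (hmem.mpr hm)), if_pos hm, ih seenC]
      · rw [if_neg (by
            rintro (h | h)
            · exact hx h
            · exact hm (hmem.mp h)), if_neg hm, List.filter_cons]
        have hxb : (!(x == '-')) = true := by simp [hx]
        rw [hxb, if_pos rfl]
        have hseen : (seenC ++ [x]).filter (fun c => !(c == '-')) = seenC.filter (fun c => !(c == '-')) ++ [x] := by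
          simp [List.filter_append, hx]
        have hmk : ((seenC ++ [x]).filter (fun c => !(c == '-'))).map pvMk1
            = (seenC.filter (fun c => !(c == '-'))).map pvMk1 ++ [pvMk1 x] := by
          rw [hseen]; simp
        rw [← hmk, ih (seenC ++ [x])]

-- B's outer loop, characterised
theorem pvB1 (items : List Char) (n : Int) (r : List Char) (d : PySem.Dict String Int) :
    (r.foldl (pvBstep items n) d).items
      = d.items ++ (pvBkeys r d.keys).map (fun c => (pvMk1 c, pvMaskOf items n c)) := by
  induction r generalizing d with
  | nil => simp [pvBkeys]
  | cons x xs ih =>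
    simp only [List.foldl_cons, pvBkeys]
    have hck : d.contains (pvMk1 x) = true ↔ pvMk1 x ∈ d.keys :=
      PySem.Dict.contains_iff_mem_keys d (pvMk1 x)
    by_cases hskip : x = '-' ∨ pvMk1 x ∈ d.keys
    · have hcond : x = '-' ∨ d.contains (pvMk1 x) = true := by
        rcases hskip with h | h
        · exact Or.inl h
        · exact Or.inr (hck.mpr h)
      rw [show pvBstep items n d x = d by rw [pvBstep, if_pos hcond], if_pos hskip, ih d]
    · have hndash : ¬ x = '-' := fun h => hskip (Or.inl h)
      have hnmem : pvMk1 x ∉ d.keys := fun h => hskip (Or.inr h)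
      have hnc : d.contains (pvMk1 x) = false := by
        cases hc : d.contains (pvMk1 x)
        · rfl
        · exact absurd (hck.mp hc) hnmem
      have hbs : pvBstep items n d x = d.insert (pvMk1 x) (pvMaskOf items n x) := by
        rw [pvBstep, if_neg (by
          rintro (h | h)
          · exact hndash h
          · rw [hnc] at h; exact Bool.false_ne_true h)]
      rw [hbs, if_neg hskip, ih (d.insert (pvMk1 x) (pvMaskOf items n x)),
        PySem.Dict.items_insert_of_not_contains d _ hnc,
        PySem.Dict.keys_insert_of_not_contains d _ hnc]
      simp [List.append_assoc]

-- A's dict after the loop, characterised (keys and values)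
theorem pvA_items (l : List Char) :
    ((PySem.List.enumerate l (0 : Int)).foldl
      (fun d p =>
        d.insert (pvMk1 p.2)
          (PySem.Int.bor (d.getD (pvMk1 p.2) 0) (pvBit p.1)))
      PySem.Dict.empty).items
      = (PySem.List.dedup l).map (fun c => (pvMk1 c, ((pvBitsUp c l 0 : Nat) : Int))) := by
  have hkeys : ((PySem.List.enumerate l (0 : Int)).foldl
      (fun d p =>
        d.insert (pvMk1 p.2)
          (PySem.Int.bor (d.getD (pvMk1 p.2) 0) (pvBit p.1)))
      (PySem.Dict.empty : PySem.Dict String Int)).keys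
      = (PySem.List.dedup l).map pvMk1 := by
    have h := PySem.Dict.keys_foldl_insert_key (PySem.List.enumerate l (0 : Int))
      (fun p : Int × Char => pvMk1 p.2)
      (fun (d : PySem.Dict String Int) (p : Int × Char) =>
        PySem.Int.bor (d.getD (pvMk1 p.2) 0) (pvBit p.1))
      PySem.Dict.empty
    rw [h]
    have hmap : (PySem.List.enumerate l (0 : Int)).map (fun p => pvMk1 p.2)
        = l.map pvMk1 := by
      rw [show (fun (p : Int × Char) => pvMk1 p.2) = pvMk1 ∘ (fun (p : Int × Char) => p.2) from rfl,
        ← List.map_map, PySem.List.map_snd_enumerate]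
    rw [hmap]
    show PySem.Set.update ([] : List String) (l.map pvMk1) = (PySem.List.dedup l).map pvMk1
    rw [PySem.Set.update, PySem.List.dedup, PySem.Set.ofList_eq_foldl]
    have := pvFoldl_add_map l []
    simpa using this
  have hnd : ((PySem.List.enumerate l (0 : Int)).foldl
      (fun d p =>
        d.insert (pvMk1 p.2)
          (PySem.Int.bor (d.getD (pvMk1 p.2) 0) (pvBit p.1)))
      (PySem.Dict.empty : PySem.Dict String Int)).keys.Nodup := by
    exact PySem.Dict.nodup_keys_foldl_insert_key _ (fun p : Int × Char => pvMk1 p.2) _ _ (by simp)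
  rw [PySem.Dict.items_eq_map_keys _ hnd 0, hkeys, List.map_map]
  refine List.map_congr_left ?_
  intro c _
  simp only [Function.comp]
  have h := pvA1 c l 0 PySem.Dict.empty 0 (by simp)
  simp only [Nat.cast_zero, Nat.zero_or] at h
  rw [h]

-- erase is a filter on items
theorem pvErase_items (d : PySem.Dict String Int) (k : String) :
    (d.erase k).items = d.items.filter (fun p => !(p.1 == k)) := rfl

-- ===== VERDICT (by name: the statement is the Claim_ definition above) =====
theorem handle_var_mask_spec : Claim_equal_handle_var_mask := by
  intro descr _
  unfold Spec_handle_var_mask handle_var_mask handle_var_mask_alt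
  simp only []
  set s : List Char := descr.toList with hs
  -- A side
  have hrev : (PySem.List.slice? s none none (-1)).getD [] = s.reverse := by
    rw [PySem.List.slice?_none_none_neg_one]; rfl
  rw [hrev, pvErase_items, pvA_items]
  rw [List.filter_map]
  have hfa : ((PySem.List.dedup s.reverse).filter
        ((fun p : String × Int => !(p.1 == "-")) ∘ (fun c => (pvMk1 c, ((pvBitsUp c s.reverse 0 : Nat) : Int)))))
      = (PySem.List.dedup s.reverse).filter (fun c => !(c == '-')) := by
    apply List.filter_congr
    intro c _
    simp only [Function.comp]
    rw [pvMk1_beq_dash]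
  rw [hfa]
  -- B side
  have hrange : PySem.List.pyRange ((s.length : Int) - 1) (-1) (-1)
      = (PySem.List.pyRange 0 (s.length : Int) 1).reverse := by
    rw [PySem.List.pyRange_neg_one_eq_reverse]
    congr 1
    ring_nf
  rw [hrange]
  have hmaprange : ((PySem.List.pyRange 0 (s.length : Int) 1).reverse).map
      (fun i => PySem.List.pyGetD s i ' ') = s.reverse := by
    rw [List.map_reverse]
    congr 1
    exact PySem.List.map_pyGetD_pyRange_zero' s ' '
  have hfold : ((PySem.List.pyRange 0 (s.length : Int) 1).reverse).foldl
      (fun d i => pvBstep s (s.length : Int) d (PySem.List.pyGetD s i ' ')) PySem.Dict.empty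
      = (s.reverse).foldl (pvBstep s (s.length : Int)) PySem.Dict.empty := by
    rw [← hmaprange, List.foldl_map]
  rw [hfold, pvB1]
  have hbk : pvBkeys s.reverse (PySem.Dict.empty : PySem.Dict String Int).keys
      = (PySem.List.dedup s.reverse).filter (fun c => !(c == '-')) := by
    have h := pvBkeys_eq_firsts s.reverse []
    simp only [List.filter_nil, List.map_nil] at h
    rw [pvDedup_eq_firsts]
    exact h
  rw [hbk]
  show (PySem.Dict.empty : PySem.Dict String Int).items ++ _ = _
  rw [show (PySem.Dict.empty : PySem.Dict String Int).items = [] from rfl, List.nil_append]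
  apply List.map_congr_left
  intro c _
  rw [pvMaskOf_eq]
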